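-- pv_equiv track=rewrite | github.com/v-novaltd/LCEVCdec | tools/shader_tools/metadata_validator.py | split_into_identifiers
-- ===== SOURCE A (Python) =====
-- def split_into_identifiers(line):
--     # Identifiers are defined by unicode. Python's "isidentifier" function and C's compiler (and
--     # therefore GLSL's) both use the same unicode criteria. Luckily, all we really need to know is
--     # that identifiers can simply be extracted "greedily" from left to right. In other words, to
--     # get the identifiers, ignore non-identifier chars until you hit an identifier char. Then,
--     # collect chars up until the cumulative string no longer meets the criteria for an identifier
--     identifiers = []
--     if len(line) == 0:
--         return identifiers
--
--     string_so_far = ""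
--     for char in line:
--         candidate_identifier = string_so_far
--         if candidate_identifier.isidentifier():
--             candidate_identifier += char
--             if not candidate_identifier.isidentifier():
--                 candidate_identifier = candidate_identifier[:-1]
--                 identifiers.append(candidate_identifier)
--                 string_so_far = ""
--         else:
--             string_so_far = ""
--         string_so_far += char
--
--     if string_so_far.isidentifier():
--         identifiers.append(string_so_far)
--
--     return identifiers
-- ===== SOURCE B (Python) =====
-- def split_into_identifiers(line):
--     # Single pass over characters: classify each char in O(1) (identifier-start via
--     # c.isidentifier(), identifier-continue via ('_'+c).isidentifier()) and record token
--     # boundaries as indices, slicing tokens out of the line; no repeated whole-string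
--     # isidentifier checks on a growing accumulator.
--     identifiers = []
--     start = None
--     for i, char in enumerate(line):
--         if start is None:
--             if char.isidentifier():
--                 start = i
--         elif not ('_' + char).isidentifier():
--             identifiers.append(line[start:i])
--             start = i if char.isidentifier() else None
--     if start is not None:
--         identifiers.append(line[start:])
--     return identifiers
-- ===== Notes on version B (the rewrite author's own statement) =====
-- stated objective: faster
-- what changed: Replaced A's loop that re-runs isidentifier on the whole growing accumulator string at every character with a single pass that classifies each character in O(1) as identifier-start/continue and slices tokens out by recorded start index.
import Mathlib
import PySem

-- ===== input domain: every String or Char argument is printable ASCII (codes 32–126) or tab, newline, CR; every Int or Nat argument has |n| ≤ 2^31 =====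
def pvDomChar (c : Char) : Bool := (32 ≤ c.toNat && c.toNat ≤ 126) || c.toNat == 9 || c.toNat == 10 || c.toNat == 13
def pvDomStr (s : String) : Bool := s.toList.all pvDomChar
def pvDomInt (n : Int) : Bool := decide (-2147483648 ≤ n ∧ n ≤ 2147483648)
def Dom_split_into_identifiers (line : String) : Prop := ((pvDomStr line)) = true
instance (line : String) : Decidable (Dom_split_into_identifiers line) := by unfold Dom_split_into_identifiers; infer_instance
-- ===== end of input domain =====

-- B replaces A's quadratic "re-test the whole accumulated string with isidentifier at every
-- character" loop by a single pass that classifies each character in O(1) and slices tokens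
-- out by index (faster: asymptotic).

-- ===== PORT A =====
-- identifier-start / identifier-continue characters; exact for Python's str.isidentifier on
-- the printable-ASCII domain (unicode identifier chars do not occur in Dom).
def pvIsStart (c : Char) : Bool := PySem.Chars.isalpha c || c == '_'
def pvIsCont (c : Char) : Bool := PySem.Chars.isalnum c || c == '_'
-- s.isidentifier() on ASCII: nonempty, head is a start char, rest are continue chars (exact on Dom)
def pyIsIdentifier (s : List Char) : Bool :=
  match s with
  | [] => false
  | c :: rest => pvIsStart c && rest.all pvIsCont

-- one iteration of A's for-loop: state = (identifiers, string_so_far)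
def aStep (st : List (List Char) × List Char) (char : Char) : List (List Char) × List Char :=
  let candidate := st.2
  if pyIsIdentifier candidate then
    let candidate := candidate ++ [char]
    if !pyIsIdentifier candidate then
      -- candidate = candidate[:-1]; identifiers.append(candidate); string_so_far = "" + char
      (st.1 ++ [candidate.dropLast], [char])
    else
      (st.1, st.2 ++ [char])
  else
    -- string_so_far = "" + char
    (st.1, [char])

def split_into_identifiers (line : String) : List String :=
  if line.toList.length == 0 then []
  else
    let st := line.toList.foldl aStep ([], [])
    let ids := if pyIsIdentifier st.2 then st.1 ++ [st.2] else st.1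
    ids.map String.ofList

-- ===== PORT B =====
-- Source B's loop: state = (identifiers, start : Option Nat), i the index of the head of rest;
-- line[start:i] is ported as (line.drop start).take (i - start), exact since 0 ≤ start ≤ i.
def bLoop (line : List Char) (rest : List Char) (i : Nat)
    (out : List (List Char)) (start : Option Nat) : List (List Char) :=
  match rest with
  | [] =>
    match start with
    | none => out
    | some s => out ++ [line.drop s]          -- line[start:]
  | char :: rest' =>
    match start with
    | none =>
      if pvIsStart char then bLoop line rest' (i + 1) out (some i)
      else bLoop line rest' (i + 1) out none
    | some s =>
      if !pvIsCont char then
        bLoop line rest' (i + 1) (out ++ [(line.drop s).take (i - s)])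
          (if pvIsStart char then some i else none)
      else bLoop line rest' (i + 1) out (some s)

def split_into_identifiers_alt (line : String) : List String :=
  (bLoop line.toList line.toList 0 [] none).map String.ofList

-- ===== PRECONDITION & SPEC =====
def Spec_split_into_identifiers (line : String) (out : List String) : Prop := out = split_into_identifiers_alt line
instance (line : String) (out : List String) : Decidable (Spec_split_into_identifiers line out) := by unfold Spec_split_into_identifiers; infer_instance

-- ===== CLAIM (what is proved, stated in full; the proofs are below) =====
def Claim_equal_split_into_identifiers : Prop := ∀ (line : String), Dom_split_into_identifiers line → Spec_split_into_identifiers line (split_into_identifiers line)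

-- ===== LEMMAS AND PROOFS =====

lemma start_imp_cont {c : Char} (h : pvIsStart c = true) : pvIsCont c = true := by
  unfold pvIsStart at h
  unfold pvIsCont
  rcases Bool.or_eq_true_iff.1 h with h' | h'
  · simp [PySem.Chars.isalnum, h']
  · simp [h']

lemma ident_single (c : Char) : pyIsIdentifier [c] = pvIsStart c := by
  simp [pyIsIdentifier]

lemma ident_append {s : List Char} (h : pyIsIdentifier s = true) (c : Char) :
    pyIsIdentifier (s ++ [c]) = pvIsCont c := by
  cases s with
  | nil => simp [pyIsIdentifier] at h
  | cons d ds =>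
    simp only [pyIsIdentifier, List.cons_append] at h ⊢
    obtain ⟨h1, h2⟩ := (Bool.and_eq_true _ _).mp (by exact_mod_cast h)
    simp [List.all_append, h1, h2]

-- the loop invariant: A's fold (plus its final flush) equals B's indexed loop
lemma loop_eq (line : List Char) :
    ∀ (rest : List Char) (i : Nat) (out : List (List Char)) (sofar : List Char)
      (start : Option Nat),
    line.drop i = rest →
    (match start with
     | some s => s ≤ i ∧ sofar = (line.drop s).take (i - s) ∧ pyIsIdentifier sofar = true
     | none => pyIsIdentifier sofar = false) →
    (let st := rest.foldl aStep (out, sofar)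
     if pyIsIdentifier st.2 then st.1 ++ [st.2] else st.1) =
    bLoop line rest i out start := by
  intro rest
  induction rest with
  | nil =>
    intro i out sofar start hdrop hinv
    cases start with
    | none => simp [bLoop, List.foldl] at hinv ⊢; simp [hinv]
    | some s =>
      obtain ⟨hsi, hsf, hid⟩ := hinv
      have hlen : line.length ≤ i := by
        have := congrArg List.length hdrop
        simp [List.length_drop] at this
        omega
      have : (line.drop s).take (i - s) = line.drop s := by
        apply List.take_of_length_le
        simp [List.length_drop]; omega
      have hds : sofar = line.drop s := hsf.trans this
      simp [bLoop, List.foldl, hid, ← hds]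
  | cons c rest' ih =>
    intro i out sofar start hdrop hinv
    have hdrop' : line.drop (i + 1) = rest' := by
      have := congrArg (List.drop 1) hdrop
      simpa [List.drop_drop, Nat.add_comm] using this
    have hc : line.drop i = c :: rest' := hdrop
    cases start with
    | none =>
      -- sofar is not an identifier: A resets to [c]; B starts a token iff c is a start char
      simp only [List.foldl_cons]
      have hstep : aStep (out, sofar) c = (out, [c]) := by
        simp [aStep, hinv]
      rw [hstep]
      by_cases hs : pvIsStart c = true
      · rw [show bLoop line (c :: rest') i out none = bLoop line rest' (i + 1) out (some i) by
          simp [bLoop, hs]]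
        apply ih (i + 1) out [c] (some i) hdrop'
        refine ⟨by omega, ?_, by simp [ident_single, hs]⟩
        simp [hc]
      · rw [show bLoop line (c :: rest') i out none = bLoop line rest' (i + 1) out none by
          simp [bLoop, hs]]
        apply ih (i + 1) out [c] none hdrop'
        simp only [ident_single]
        simpa using hs
    | some s =>
      obtain ⟨hsi, hsf, hid⟩ := hinv
      simp only [List.foldl_cons]
      by_cases hcont : pvIsCont c = true
      · -- c continues the token in both programs
        have hstep : aStep (out, sofar) c = (out, sofar ++ [c]) := by
          simp [aStep, hid, ident_append hid, hcont]
        rw [hstep]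
        rw [show bLoop line (c :: rest') i out (some s) = bLoop line rest' (i + 1) out (some s) by
          simp [bLoop, hcont]]
        apply ih (i + 1) out (sofar ++ [c]) (some s) hdrop'
        refine ⟨by omega, ?_, by simp [ident_append hid, hcont]⟩
        have h1 : i + 1 - s = (i - s) + 1 := by omega
        have h2 : (line.drop s).drop (i - s) = c :: rest' := by
          rw [List.drop_drop]
          simp [show s + (i - s) = i by omega, hc]
        rw [h1, List.take_add, h2, hsf]
        simp
      · -- c ends the token: both flush; c cannot start a new token (start ⊆ continue)
        have hns : pvIsStart c = false := by
          by_contra h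
          exact hcont (start_imp_cont (by simpa using h))
        have hstep : aStep (out, sofar) c = (out ++ [sofar], [c]) := by
          simp [aStep, hid, ident_append hid, hcont]
        rw [hstep]
        have hb : bLoop line (c :: rest') i out (some s)
            = bLoop line rest' (i + 1) (out ++ [(line.drop s).take (i - s)]) none := by
          simp [bLoop, hcont, hns]
        rw [hb, ← hsf]
        apply ih (i + 1) (out ++ [sofar]) [c] none hdrop'
        simp [ident_single, hns]

-- ===== VERDICT (by name: the statement is the Claim_ definition above) =====
theorem split_into_identifiers_spec : Claim_equal_split_into_identifiers := by
  intro line _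
  unfold Spec_split_into_identifiers split_into_identifiers split_into_identifiers_alt
  by_cases h : line.toList.length = 0
  · have : line.toList = [] := List.eq_nil_of_length_eq_zero h
    simp [this, bLoop]
  · have hmain := loop_eq line.toList line.toList 0 [] [] none (by simp)
      (by simp [pyIsIdentifier])
    rw [if_neg (by simpa using h)]
    exact congrArg (List.map String.ofList) hmain
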